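-- pv_equiv track=rewrite | github.com/lmingora/demo_agent | src/rag/toolbox.py | _results_to_context_md
-- ===== SOURCE A (Python) =====
-- from typing import Any, Dict, List, Optional, Iterable
--
-- def _results_to_context_md(results: List[Dict[str, Any]], max_chars: int = 4000) -> str:
--     """Construye un markdown compacto a partir de los results para el cierre."""
--     if not results:
--         return ""
--     lines: List[str] = []
--     used = 0
--     for i, r in enumerate(results, 1):
--         src = r.get("source", "unknown")
--         txt = (r.get("text") or "").strip().replace("\n", " ")
--         piece = f"- [{i}] ({src}) {txt}"
--         if used + len(piece) > max_chars:
--             break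
--         lines.append(piece)
--         used += len(piece)
--     return "\n".join(lines)
-- ===== SOURCE B (Python) =====
-- from typing import Any, Dict, List
--
--
-- def _render(i: int, r: Dict[str, Any]) -> str:
--     src = r.get("source", "unknown")
--     txt = (r.get("text") or "").strip().replace("\n", " ")
--     return f"- [{i}] ({src}) {txt}"
--
--
-- def _results_to_context_md(results: List[Dict[str, Any]], max_chars: int = 4000) -> str:
--     # Pass 1: render every piece.
--     pieces = [_render(i, r) for i, r in enumerate(results, 1)]
--     # Pass 2: cumulative lengths.
--     cums = []
--     total = 0
--     for p in pieces:
--         total += len(p)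
--         cums.append(total)
--     # Cut at the first piece whose cumulative length exceeds the budget.
--     n = next((k for k, c in enumerate(cums) if c > max_chars), len(pieces))
--     return "\n".join(pieces[:n])
-- ===== Notes on version B (the rewrite author's own statement) =====
-- stated objective: alternative
-- what changed: A interleaves rendering and budget tracking in one loop with an early break; B renders all pieces first, computes the cumulative lengths in a separate pass, finds the first overflow index and joins the sliced prefix.
import Mathlib
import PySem

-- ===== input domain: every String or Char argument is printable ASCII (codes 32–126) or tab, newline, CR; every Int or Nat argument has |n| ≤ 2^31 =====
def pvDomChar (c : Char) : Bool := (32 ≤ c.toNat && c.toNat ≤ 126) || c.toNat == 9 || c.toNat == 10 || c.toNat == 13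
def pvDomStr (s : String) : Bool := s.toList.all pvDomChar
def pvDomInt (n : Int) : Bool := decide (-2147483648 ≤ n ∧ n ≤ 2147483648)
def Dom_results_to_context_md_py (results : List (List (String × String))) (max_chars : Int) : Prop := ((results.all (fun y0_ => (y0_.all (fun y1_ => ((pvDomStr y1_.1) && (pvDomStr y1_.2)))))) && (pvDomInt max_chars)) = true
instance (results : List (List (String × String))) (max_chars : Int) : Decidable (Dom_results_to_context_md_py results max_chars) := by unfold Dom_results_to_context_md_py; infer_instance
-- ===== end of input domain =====

-- B renders all pieces first (a map), then selects the budget-fitting prefix by cumulative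
-- lengths in a second pass, instead of A's single loop that interleaves rendering, the running
-- total and an early break; return values proved equal on all inputs (objective: alternative).

-- ===== PORT A =====
-- A's loop over enumerate(results, 1) carrying (i, used, lines); returning `lines` = Python's break.
-- `(r.get("text") or "")` is ported as get? + getD "": the only falsy str is "", so `or ""` is the identity there.
def pvLoopA (max_chars : Int) : List (List (String × String)) → Int → Int → List String → List String
  | [], _, _, lines => lines
  | r :: rs, i, used, lines =>
    let src := (PySem.Dict.mk r).getD "source" "unknown"
    let txt := PySem.Str.replace (PySem.Str.strip (((PySem.Dict.mk r).get? "text").getD "")) "\n" " "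
    let piece := "- [" ++ PySem.Int.toStr i ++ "] (" ++ src ++ ") " ++ txt
    if used + PySem.Str.len piece > max_chars then lines
    else pvLoopA max_chars rs (i + 1) (used + PySem.Str.len piece) (lines ++ [piece])

def results_to_context_md_py (results : List (List (String × String))) (max_chars : Int) : String :=
  if results = [] then ""
  else PySem.Str.join "\n" (pvLoopA max_chars results 1 0 [])

-- ===== PORT B =====
-- Source B's _render helper.
def pvRender (i : Int) (r : List (String × String)) : String :=
  let src := (PySem.Dict.mk r).getD "source" "unknown"
  let txt := PySem.Str.replace (PySem.Str.strip (((PySem.Dict.mk r).get? "text").getD "")) "\n" " "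
  "- [" ++ PySem.Int.toStr i ++ "] (" ++ src ++ ") " ++ txt

def results_to_context_md_py_alt (results : List (List (String × String))) (max_chars : Int) : String :=
  let pieces := (PySem.List.enumerate results 1).map (fun p => pvRender p.1 p.2)
  -- pass 2: cums via the loop `total += len(p); cums.append(total)`
  let st := pieces.foldl (fun (st : List Int × Int) p =>
      (st.1 ++ [st.2 + PySem.Str.len p], st.2 + PySem.Str.len p)) ([], 0)
  let cums := st.1
  -- n = next((k for k, c in enumerate(cums) if c > max_chars), len(pieces))
  let n : Int := match (PySem.List.enumerate cums 0).find? (fun kc => decide (max_chars < kc.2)) with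
    | some kc => kc.1
    | none => (pieces.length : Int)
  PySem.Str.join "\n" (PySem.List.slice pieces none (some n))

-- ===== PRECONDITION & SPEC =====
def Spec_results_to_context_md_py (results : List (List (String × String))) (max_chars : Int) (out : String) : Prop := out = results_to_context_md_py_alt results max_chars
instance (results : List (List (String × String))) (max_chars : Int) (out : String) : Decidable (Spec_results_to_context_md_py results max_chars out) := by unfold Spec_results_to_context_md_py; infer_instance

-- ===== CLAIM (what is proved, stated in full; the proofs are below) =====
def Claim_equal_results_to_context_md_py : Prop := ∀ (results : List (List (String × String))) (max_chars : Int), Dom_results_to_context_md_py results max_chars → Spec_results_to_context_md_py results max_chars (results_to_context_md_py results max_chars)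

-- ===== LEMMAS AND PROOFS =====

-- number of pieces kept, from length list `Ls` starting at running total `t`
def pvCut (max_chars : Int) : List Int → Int → Nat
  | [], _ => 0
  | L :: Ls, t => if t + L > max_chars then 0 else pvCut max_chars Ls (t + L) + 1

-- cumulative sums of `Ls` starting from `t`
def pvCums (t : Int) : List Int → List Int
  | [] => []
  | L :: Ls => (t + L) :: pvCums (t + L) Ls

theorem pvLoopA_eq (max_chars : Int) (rs : List (List (String × String))) :
    ∀ (i used : Int) (lines : List String),
      pvLoopA max_chars rs i used lines =
        lines ++ (((PySem.List.enumerate rs i).map (fun p => pvRender p.1 p.2)).take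
          (pvCut max_chars (((PySem.List.enumerate rs i).map (fun p => pvRender p.1 p.2)).map PySem.Str.len) used)) := by
  induction rs with
  | nil => intro i used lines; simp [pvLoopA, PySem.List.enumerate, pvCut]
  | cons r rs ih =>
    intro i used lines
    rw [PySem.List.enumerate_cons]
    simp only [List.map_cons, pvCut]
    show (if used + PySem.Str.len (pvRender i r) > max_chars then lines
          else pvLoopA max_chars rs (i + 1) (used + PySem.Str.len (pvRender i r)) (lines ++ [pvRender i r])) = _
    split_ifs with h
    · simp
    · rw [ih, List.take_succ_cons]
      simp

theorem pvFold_cums (pieces : List String) :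
    ∀ (acc : List Int) (t : Int),
      (pieces.foldl (fun (st : List Int × Int) p =>
        (st.1 ++ [st.2 + PySem.Str.len p], st.2 + PySem.Str.len p)) (acc, t)).1 =
        acc ++ pvCums t (pieces.map PySem.Str.len) := by
  induction pieces with
  | nil => intro acc t; simp [pvCums]
  | cons p ps ih =>
    intro acc t
    simp only [List.foldl_cons, List.map_cons, pvCums]
    rw [ih]
    simp

theorem pvFind_cut (max_chars : Int) (Ls : List Int) :
    ∀ (t s : Int),
      (match (PySem.List.enumerate (pvCums t Ls) s).find? (fun kc => decide (max_chars < kc.2)) with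
        | some kc => kc.1
        | none => s + Ls.length) = s + (pvCut max_chars Ls t : Int) := by
  induction Ls with
  | nil => intro t s; simp [pvCums, pvCut]
  | cons L Ls ih =>
    intro t s
    simp only [pvCums, pvCut, PySem.List.enumerate_cons]
    by_cases h : max_chars < t + L
    · simp [List.find?_cons_of_pos, h]
    · have h' : ¬ (t + L > max_chars) := h
      rw [if_neg h', List.find?_cons_of_neg (by simp [h])]
      have := ih (t + L) (s + 1)
      cases hf : (PySem.List.enumerate (pvCums (t + L) Ls) (s + 1)).find?
          (fun kc => decide (max_chars < kc.2)) with
      | none =>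
        rw [hf] at this
        simp only at this
        simp only [List.length_cons]
        push_cast at this ⊢
        linarith [this]
      | some kc =>
        rw [hf] at this
        simp only at this
        push_cast at this ⊢
        omega

-- ===== VERDICT (by name: the statement is the Claim_ definition above) =====
theorem results_to_context_md_py_spec : Claim_equal_results_to_context_md_py := by
  intro results max_chars _
  unfold Spec_results_to_context_md_py results_to_context_md_py results_to_context_md_py_alt
  set pieces := (PySem.List.enumerate results 1).map (fun p => pvRender p.1 p.2) with hp
  have hfold := pvFold_cums pieces [] 0
  have hfind := pvFind_cut max_chars (pieces.map PySem.Str.len) 0 0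
  simp only [zero_add, List.nil_append] at hfold hfind
  simp only [hfold, List.length_map] at *
  rw [hfind]
  rw [PySem.List.slice_to_natCast]
  split_ifs with hnil
  · subst hnil; simp only [hp, PySem.List.enumerate_nil, List.map_nil, List.take_nil]
    decide
  · rw [pvLoopA_eq max_chars results 1 0 []]
    simp [hp]
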